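-- pv_equiv track=rewrite | github.com/thanhtd32/advancedpython_part1 | Exercise15.py | min_frequency_all
-- ===== SOURCE A (Python) =====
-- def frequency(toiecScores):
--     counters=[0]*10
--     for toiecScore in toiecScores:
--         counters[toiecScore//100]+=1
--     return counters
--
-- def findMaxValue(counters):
--     max = 0
--     for i in counters:
--         if max<i:
--             max=i
--     return max
--
-- def findMinValue(counters):
--     min = findMaxValue(counters)
--     for i in counters:
--         if i!=0 and i<min:
--             min=i
--     return min
--
-- def min_frequency_all(toiecScores):
--     counters = frequency(toiecScores)
--     minFrequency=findMinValue(counters)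
--     list_scoreBase=[]#the list to store all scorebase that the same min frequency
--     N=len(counters)
--     for i in range(N):
--         if minFrequency==counters[i]:#if the same max value, we store in to the list
--             list_scoreBase.append(i * 100)
--     return list_scoreBase,minFrequency
-- ===== SOURCE B (Python) =====
-- def min_frequency_all(toiecScores):
--     counters = [0] * 10
--     for toiecScore in toiecScores:
--         counters[toiecScore // 100] += 1
--     groups = {}
--     for i, c in enumerate(counters):
--         groups.setdefault(c, []).append(i * 100)
--     nonzero = [c for c in groups if c != 0]
--     minFrequency = min(nonzero, default=0)
--     return groups[minFrequency], minFrequency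
-- ===== Notes on version B (the rewrite author's own statement) =====
-- stated objective: alternative
-- what changed: Replaces A's three post-passes over the bins (running-max loop, running-min-of-nonzero loop seeded with the max, and a final equality scan) by one grouping pass that builds a dict mapping frequency -> list of bin bases, then takes min over the nonzero keys (default 0) and looks the answer up in the dict.
import Mathlib
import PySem

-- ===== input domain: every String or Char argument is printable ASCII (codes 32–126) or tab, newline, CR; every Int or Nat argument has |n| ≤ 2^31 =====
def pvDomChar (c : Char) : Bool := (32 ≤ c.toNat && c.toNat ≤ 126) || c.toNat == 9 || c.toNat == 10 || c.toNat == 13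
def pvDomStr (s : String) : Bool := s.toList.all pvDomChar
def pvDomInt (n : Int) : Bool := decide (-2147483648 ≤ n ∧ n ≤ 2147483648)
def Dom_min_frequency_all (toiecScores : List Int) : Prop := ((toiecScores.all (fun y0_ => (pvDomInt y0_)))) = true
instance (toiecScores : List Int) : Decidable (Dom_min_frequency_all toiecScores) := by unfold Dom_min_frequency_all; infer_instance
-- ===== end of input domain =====

-- B replaces A's three post-passes over the bins (max loop, min-of-nonzero loop, equality scan)
-- by one grouping pass building a dict frequency -> list of bin bases plus a min over the nonzero keys.

-- ===== PORT A =====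
def frequency (toiecScores : List Int) : List Int :=
  toiecScores.foldl
    (fun counters toiecScore =>
      PySem.List.pySetD counters (PySem.Int.floordiv toiecScore 100)
        (PySem.List.pyGetD counters (PySem.Int.floordiv toiecScore 100) 0 + 1))
    (List.replicate 10 0)

def findMaxValue (counters : List Int) : Int :=
  counters.foldl (fun mx i => if mx < i then i else mx) 0

def findMinValue (counters : List Int) : Int :=
  counters.foldl (fun mn i => if i ≠ 0 ∧ i < mn then i else mn) (findMaxValue counters)

def min_frequency_all (toiecScores : List Int) : List Int × Int :=
  let counters := frequency toiecScores
  let minFrequency := findMinValue counters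
  let N := PySem.List.len counters
  let list_scoreBase := (PySem.List.pyRange 0 N).foldl
    (fun acc i => if minFrequency = PySem.List.pyGetD counters i 0 then acc ++ [i * 100] else acc) []
  (list_scoreBase, minFrequency)

-- ===== PORT B =====
def min_frequency_all_alt (toiecScores : List Int) : List Int × Int :=
  let counters := toiecScores.foldl
    (fun counters toiecScore =>
      PySem.List.pySetD counters (PySem.Int.floordiv toiecScore 100)
        (PySem.List.pyGetD counters (PySem.Int.floordiv toiecScore 100) 0 + 1))
    (List.replicate 10 0)
  let groups := (PySem.List.enumerate counters).foldl
    (fun g p => g.modify p.2 [] (fun l => l ++ [p.1 * 100]))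
    (PySem.Dict.empty : PySem.Dict Int (List Int))
  let nonzero := (PySem.Dict.keys groups).filter (fun c => decide (c ≠ 0))
  let minFrequency := PySem.List.minD nonzero (fun x => x) 0
  (groups.getD minFrequency [], minFrequency)

-- ===== PRECONDITION & SPEC =====
-- Pre_: exactly the inputs where A returns normally; a score s with s ≥ 1000 or s < -1000 makes
-- counters[s // 100] an IndexError in A (and in B, which bins identically).
def Pre_min_frequency_all (toiecScores : List Int) : Prop :=
  ∀ s ∈ toiecScores, -1000 ≤ s ∧ s < 1000
instance (toiecScores : List Int) : Decidable (Pre_min_frequency_all toiecScores) := by unfold Pre_min_frequency_all; infer_instance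

def pvWitness_min_frequency_all : List Int := [150, 250, 250, 999]

def Spec_min_frequency_all (toiecScores : List Int) (out : List Int × Int) : Prop := out = min_frequency_all_alt toiecScores
instance (toiecScores : List Int) (out : List Int × Int) : Decidable (Spec_min_frequency_all toiecScores out) := by unfold Spec_min_frequency_all; infer_instance

-- ===== CLAIM (what is proved, stated in full; the proofs are below) =====
def Claim_equal_min_frequency_all : Prop := ∀ (toiecScores : List Int), Dom_min_frequency_all toiecScores → Pre_min_frequency_all toiecScores → Spec_min_frequency_all toiecScores (min_frequency_all toiecScores)

-- ===== LEMMAS AND PROOFS =====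

-- A's max loop is a running max
theorem findMaxValue_eq (cs : List Int) : findMaxValue cs = cs.foldl max 0 := by
  unfold findMaxValue
  have h : (fun (mx i : Int) => if mx < i then i else mx) = max := by
    funext a b; rcases lt_or_ge a b with h | h <;> simp [max_def] <;> omega
  rw [h]

-- A's min loop is a running min over the nonzero entries, seeded with the max
theorem findMinValue_eq (cs : List Int) :
    findMinValue cs = (cs.filter (fun c => decide (c ≠ 0))).foldl min (findMaxValue cs) := by
  unfold findMinValue
  have h : (fun (mn i : Int) => if i ≠ 0 ∧ i < mn then i else mn)
      = (fun (mn i : Int) => if i ≠ 0 then min mn i else mn) := by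
    funext a b
    by_cases h0 : b = 0
    · simp [h0]
    · simp only [h0, ne_eq, not_false_eq_true, true_and, if_true, min_def]
      split_ifs <;> omega
  rw [h]
  exact PySem.List.foldl_ite_eq_foldl_filter (fun i => i ≠ 0) min cs (findMaxValue cs)

-- the two minimum computations agree on a nonnegative bin list
theorem min_eq (cs : List Int) :
    findMinValue cs =
      PySem.List.minD ((PySem.Dict.keys
        ((PySem.List.enumerate cs).foldl
          (fun g p => g.modify p.2 [] (fun l => l ++ [p.1 * 100]))
          (PySem.Dict.empty : PySem.Dict Int (List Int)))).filter (fun c => decide (c ≠ 0)))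
        (fun x => x) 0 := by
  -- B's key list is the ordered dedup of cs
  have hkeys : (PySem.Dict.keys
      ((PySem.List.enumerate cs).foldl
        (fun g p => g.modify p.2 [] (fun l => l ++ [p.1 * 100]))
        (PySem.Dict.empty : PySem.Dict Int (List Int)))) = PySem.Set.ofList cs := by
    rw [PySem.Dict.keys_foldl_modify_key (PySem.List.enumerate cs) (fun p => p.2) []
      (fun _ p l => l ++ [p.1 * 100]) PySem.Dict.empty]
    rw [PySem.Set.ofList_eq_foldl]
    simp [PySem.Set.update, PySem.Dict.keys, PySem.Dict.empty, PySem.List.map_snd_enumerate]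
  rw [hkeys, findMinValue_eq, findMaxValue_eq]
  set mx := cs.foldl max 0 with hmx
  set nz := cs.filter (fun c => decide (c ≠ 0)) with hnz
  set kf := (PySem.Set.ofList cs).filter (fun c => decide (c ≠ 0)) with hkf
  have hmem_nz : ∀ y, y ∈ nz ↔ (y ∈ cs ∧ y ≠ 0) := by intro y; simp [hnz]
  have hmem_kf : ∀ y, y ∈ kf ↔ (y ∈ cs ∧ y ≠ 0) := by
    intro y; simp [hkf, List.mem_filter, PySem.Set.mem_ofList]
  by_cases hne : ∃ y ∈ cs, y ≠ 0
  · obtain ⟨y0, hy0m, hy0⟩ := hne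
    have hnzne : nz ≠ [] := by
      intro h; have := (hmem_nz y0).mpr ⟨hy0m, hy0⟩; simp [h] at this
    have hkfne : kf ≠ [] := by
      intro h; have := (hmem_kf y0).mpr ⟨hy0m, hy0⟩; simp [h] at this
    -- A's value: member of nz and lower bound of nz
    have hminle := PySem.List.foldl_min_le nz mx
    have hA_mem : nz.foldl min mx ∈ nz := by
      rcases PySem.List.foldl_min_mem nz mx with h | h
      · -- foldl min = mx: then any element of nz equals mx
        have hy0nz : y0 ∈ nz := (hmem_nz y0).mpr ⟨hy0m, hy0⟩
        have h1 : nz.foldl min mx ≤ y0 := hminle.2 y0 hy0nz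
        have h2 : y0 ≤ mx := (PySem.List.le_foldl_max cs 0).2 y0 hy0m
        have : nz.foldl min mx = y0 := by omega
        rw [this]; exact hy0nz
      · exact h
    -- B's value: minD over nonempty kf
    cases hm : PySem.List.min? kf (fun x => x) with
    | none => exact absurd ((PySem.List.min?_eq_none_iff kf _).mp hm) hkfne
    | some m =>
      have hB : PySem.List.minD kf (fun x => x) 0 = m := by
        simp [PySem.List.minD, hm]
      rw [hB]
      have hm_mem : m ∈ kf := PySem.List.min?_mem hm
      have hm_min : ∀ y ∈ kf, m ≤ y := fun y hy => PySem.List.min?_isMin hm y hy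
      have hm_nz : m ∈ nz := (hmem_nz m).mpr ((hmem_kf m).mp hm_mem)
      have hA_kf : nz.foldl min mx ∈ kf := (hmem_kf _).mpr ((hmem_nz _).mp hA_mem)
      have h1 : m ≤ nz.foldl min mx := hm_min _ hA_kf
      have h2 : nz.foldl min mx ≤ m := hminle.2 m hm_nz
      omega
  · -- every entry is zero
    have hne : ∀ y ∈ cs, y = 0 := by
      intro y hy; by_contra h; exact hne ⟨y, hy, h⟩
    have hnz0 : nz = [] := by
      rw [hnz, List.filter_eq_nil_iff]; intro a ha; simpa using hne a ha
    have hkf0 : kf = [] := by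
      apply List.eq_nil_iff_forall_not_mem.mpr
      intro y hy; exact ((hmem_kf y).mp hy).2 (hne y ((hmem_kf y).mp hy).1)
    rw [hnz0, hkf0, PySem.List.minD_nil]
    simp only [List.foldl_nil]
    rcases PySem.List.foldl_max_mem cs 0 with h | h
    · exact h
    · have := hne _ h; omega

-- the collected score-base lists agree once the minimum values agree
theorem list_eq (cs : List Int) (μ : Int) :
    (PySem.List.pyRange 0 (PySem.List.len cs)).foldl
      (fun acc i => if μ = PySem.List.pyGetD cs i 0 then acc ++ [i * 100] else acc) [] =
    ((PySem.List.enumerate cs).foldl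
      (fun g p => g.modify p.2 [] (fun l => l ++ [p.1 * 100]))
      (PySem.Dict.empty : PySem.Dict Int (List Int))).getD μ [] := by
  -- A's loop is filter-then-map over the index range
  rw [PySem.List.foldl_append_ite (fun i => μ = PySem.List.pyGetD cs i 0) (fun i => i * 100)]
  -- B's dict fold, rewritten as a fold over (count, base) pairs
  have hfold : ((PySem.List.enumerate cs).foldl
      (fun g p => g.modify p.2 [] (fun l => l ++ [p.1 * 100]))
      (PySem.Dict.empty : PySem.Dict Int (List Int))) =
      (((PySem.List.enumerate cs).map (fun p => (p.2, p.1 * 100))).foldl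
        (fun d p => d.modify p.1 [] (fun x => x ++ [p.2]))
        (PySem.Dict.empty : PySem.Dict Int (List Int))) := by
    rw [List.foldl_map]
  rw [hfold, PySem.Dict.getD_foldl_modify_append]
  rw [List.filter_map]
  rw [PySem.List.enumerate_eq_map_pyRange cs 0, List.filter_map]
  simp only [List.map_map, List.nil_append, Function.comp_def]
  rw [show (PySem.Dict.empty : PySem.Dict Int (List Int)).getD μ [] = [] from rfl]
  rw [List.nil_append]
  congr 1
  apply List.filter_congr
  intro i _
  generalize PySem.List.pyGetD cs i 0 = x
  by_cases h : μ = x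
  · subst h; simp
  · simp [h, Ne.symm h]

-- ===== VERDICT (by name: the statement is the Claim_ definition above) =====
theorem min_frequency_all_spec : Claim_equal_min_frequency_all := by
  intro toiecScores _ _
  unfold Spec_min_frequency_all min_frequency_all min_frequency_all_alt
  have hcs : (toiecScores.foldl
      (fun counters toiecScore =>
        PySem.List.pySetD counters (PySem.Int.floordiv toiecScore 100)
          (PySem.List.pyGetD counters (PySem.Int.floordiv toiecScore 100) 0 + 1))
      (List.replicate 10 0)) = frequency toiecScores := rfl
  simp only [hcs]
  rw [← min_eq (frequency toiecScores),
      ← list_eq (frequency toiecScores) (findMinValue (frequency toiecScores))]
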